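-- pv_equiv track=rewrite | github.com/dmshirochenko/ai_book_creation | src/core/text_processor.py | _extract_title_and_content
-- ===== SOURCE A (Python) =====
-- def _extract_title_and_content(adapted_text: str) -> tuple[str, str]:
--     """
--     Extract title from the first line and remaining content.
--     """
--     lines = adapted_text.strip().split('\n')
--
--     if not lines:
--         return "Untitled Story", ""
--
--     # First non-empty line is the title
--     title = ""
--     content_start = 0
--
--     for i, line in enumerate(lines):
--         stripped = line.strip()
--         if stripped:
--             title = stripped
--             content_start = i + 1
--             break
--
--     # Rest is content
--     content_lines = [l.strip() for l in lines[content_start:] if l.strip()]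
--     content = '\n'.join(content_lines)
--
--     return title, content
-- ===== SOURCE B (Python) =====
-- def _extract_title_and_content(adapted_text: str) -> tuple[str, str]:
--     title = None
--     content = ""
--     for line in adapted_text.strip().split('\n'):
--         s = line.strip()
--         if not s:
--             continue
--         if title is None:
--             title = s
--         elif content:
--             content = content + "\n" + s
--         else:
--             content = s
--     return (title if title is not None else "", content)
-- ===== Notes on version B (the rewrite author's own statement) =====
-- stated objective: alternative
-- what changed: Replaces A's staged decomposition (indexed title-scan with break, then a list comprehension over the tail slice joined at the end) by a single stateful pass that threads an (optional title, content-so-far) accumulator and grows the content by incremental string concatenation, building no intermediate list and never joining or slicing.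
import Mathlib
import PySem

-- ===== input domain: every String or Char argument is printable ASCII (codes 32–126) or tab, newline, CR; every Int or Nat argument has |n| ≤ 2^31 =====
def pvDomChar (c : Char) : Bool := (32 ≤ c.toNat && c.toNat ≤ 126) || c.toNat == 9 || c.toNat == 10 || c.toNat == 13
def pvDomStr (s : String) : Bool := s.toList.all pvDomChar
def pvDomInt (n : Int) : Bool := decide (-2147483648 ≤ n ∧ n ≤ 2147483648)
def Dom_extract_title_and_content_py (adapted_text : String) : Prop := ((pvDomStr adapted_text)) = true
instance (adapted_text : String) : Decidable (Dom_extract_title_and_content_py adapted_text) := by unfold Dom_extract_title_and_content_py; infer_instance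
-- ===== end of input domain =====

-- B replaces A's staged decomposition (indexed title-scan with break, then a filtered list
-- comprehension over the tail slice joined at the end) by a single stateful pass threading an
-- (optional title, content-so-far) accumulator with incremental concatenation; alternative.


-- ===== PORT A =====
-- the comprehension "[l.strip() for l in … if l.strip()]" in A
def pvFiltLine (l : String) : Option String :=
  let s := PySem.Str.strip l
  if s ≠ "" then some s else none

-- A's title loop: "for i, line in enumerate(lines): … break" with state (title, content_start)
-- initialised to ("", 0); returns the initial state if no line has non-empty strip.
def findTitleA : List String → Nat → String × Nat
  | [], _ => ("", 0)
  | line :: rest, i =>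
    let stripped := PySem.Str.strip line
    if stripped ≠ "" then (stripped, i + 1) else findTitleA rest (i + 1)

def extract_title_and_content_py (adapted_text : String) : String × String :=
  let lines := (PySem.Chars.splitOn (PySem.Str.strip adapted_text).toList ['\n']).map String.ofList
  if lines = [] then ("Untitled Story", "")
  else
    let tc := findTitleA lines 0
    let content_lines := (PySem.List.slice lines (some ((tc.2 : Nat) : Int)) none).filterMap pvFiltLine
    (tc.1, PySem.Str.join "\n" content_lines)

-- ===== PORT B =====
-- B's loop body: state is (title : Option, content : chars so far); "content + '\n' + s" is
-- string concatenation, ported exactly as concatenation of the character lists.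
def stepB (st : Option String × List Char) (line : String) : Option String × List Char :=
  let s := PySem.Str.strip line
  if s = "" then st
  else
    match st.1 with
    | none => (some s, st.2)
    | some _ => if st.2 ≠ [] then (st.1, st.2 ++ '\n' :: s.toList) else (st.1, s.toList)

def extract_title_and_content_py_alt (adapted_text : String) : String × String :=
  let lines := (PySem.Chars.splitOn (PySem.Str.strip adapted_text).toList ['\n']).map String.ofList
  let st := lines.foldl stepB (none, [])
  (st.1.getD "", String.ofList st.2)

-- ===== PRECONDITION & SPEC =====
def Spec_extract_title_and_content_py (adapted_text : String) (out : String × String) : Prop := out = extract_title_and_content_py_alt adapted_text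
instance (adapted_text : String) (out : String × String) : Decidable (Spec_extract_title_and_content_py adapted_text out) := by unfold Spec_extract_title_and_content_py; infer_instance

-- ===== CLAIM (what is proved, stated in full; the proofs are below) =====
def Claim_equal_extract_title_and_content_py : Prop := ∀ (adapted_text : String), Dom_extract_title_and_content_py adapted_text → Spec_extract_title_and_content_py adapted_text (extract_title_and_content_py adapted_text)

-- ===== LEMMAS AND PROOFS =====

-- glue r = characters contributed by the lines of r after the first content line
def pvGlue (r : List String) : List Char := r.flatMap (fun s => '\n' :: s.toList)

-- joinChars r = the characters of '\n'.join(r)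
def pvJoinChars : List String → List Char
  | [] => []
  | y :: ys => y.toList ++ pvGlue ys

lemma strip_toList_ne {s : String} (h : ¬ s = "") : s.toList ≠ [] := by
  intro hc
  apply h
  have := congrArg String.ofList hc
  simpa using this

-- after title found and content non-empty, the fold appends glue of the filtered rest
lemma foldB_full (xs : List String) : ∀ (t : String) (c : List Char), c ≠ [] →
    xs.foldl stepB (some t, c) = (some t, c ++ pvGlue (xs.filterMap pvFiltLine)) := by
  induction xs with
  | nil => intro t c _; simp [pvGlue]
  | cons l rest ih =>
    intro t c hc
    by_cases h : PySem.Str.strip l = ""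
    · simp [stepB, h, pvFiltLine, ih t c hc]
    · have hstep : stepB (some t, c) l = (some t, c ++ '\n' :: (PySem.Str.strip l).toList) := by
        simp [stepB, h, hc]
      simp only [List.foldl_cons, hstep]
      rw [ih t _ (by simp)]
      simp [pvFiltLine, h, pvGlue]

-- after title found with empty content, the fold computes joinChars of the filtered rest
lemma foldB_some (xs : List String) : ∀ (t : String),
    xs.foldl stepB (some t, []) = (some t, pvJoinChars (xs.filterMap pvFiltLine)) := by
  induction xs with
  | nil => intro t; simp [pvJoinChars]
  | cons l rest ih =>
    intro t
    by_cases h : PySem.Str.strip l = ""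
    · simp [stepB, h, pvFiltLine, ih t]
    · have hstep : stepB (some t, []) l = (some t, (PySem.Str.strip l).toList) := by
        simp [stepB, h]
      simp only [List.foldl_cons, hstep]
      rw [foldB_full rest t _ (strip_toList_ne h)]
      simp [pvFiltLine, h, pvJoinChars]

-- the whole fold from the initial state, characterised by the filtered line list
lemma foldB_none (xs : List String) :
    xs.foldl stepB (none, []) =
      (match xs.filterMap pvFiltLine with
       | [] => (none, ([] : List Char))
       | y :: ys => (some y, pvJoinChars ys)) := by
  induction xs with
  | nil => simp
  | cons l rest ih =>
    by_cases h : PySem.Str.strip l = ""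
    · simp [stepB, h, pvFiltLine, ih]
    · have hstep : stepB (none, []) l = (some (PySem.Str.strip l), []) := by
        simp [stepB, h]
      simp only [List.foldl_cons, hstep]
      rw [foldB_some]
      simp [pvFiltLine, h]

-- joinChars is exactly '\n'.join
lemma joinChars_eq (r : List String) :
    PySem.Str.join "\n" r = String.ofList (pvJoinChars r) := by
  unfold PySem.Str.join
  congr 1
  induction r with
  | nil => simp [PySem.Chars.join, pvJoinChars, List.intercalate]
  | cons y ys ih =>
    cases ys with
    | nil => simp [PySem.Chars.join, pvJoinChars, pvGlue, List.intercalate]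
    | cons z zs =>
      simp only [List.map_cons] at ih ⊢
      rw [show ("\n".toList) = ['\n'] from by decide] at ih ⊢
      rw [PySem.Chars.join_cons_cons, ih]
      simp [pvJoinChars, pvGlue]

-- B's fold equals the head/tail selection on the filtered line list
lemma altB_char (xs : List String) :
    ((xs.foldl stepB (none, [])).1.getD "", String.ofList (xs.foldl stepB (none, [])).2)
    = (match xs.filterMap pvFiltLine with
       | [] => ("", "")
       | y :: ys => (y, PySem.Str.join "\n" ys)) := by
  rw [foldB_none]
  cases hfm : xs.filterMap pvFiltLine with
  | nil => simp
  | cons y ys => simp [joinChars_eq]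

-- splitOn never returns the empty list (its result always ends in a reversed cons)
lemma splitOn_go_ne_nil (sep : List Char) : ∀ (fuel : Nat) (l cur : List Char) (acc : List (List Char)),
    PySem.Chars.splitOn.go sep fuel l cur acc ≠ [] := by
  intro fuel
  induction fuel with
  | zero => intro l cur acc; simp [PySem.Chars.splitOn.go]
  | succ n ih =>
    intro l cur acc
    cases l with
    | nil => simp [PySem.Chars.splitOn.go]
    | cons c rest =>
      rw [PySem.Chars.splitOn.go]
      split
      · exact ih _ _ _
      · exact ih _ _ _

lemma splitOn_ne_nil (s sep : List Char) : PySem.Chars.splitOn s sep ≠ [] := by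
  unfold PySem.Chars.splitOn
  exact splitOn_go_ne_nil sep _ s [] []

-- the loop's final content_start is 0 (not found) or strictly past the start index
lemma findTitleA_snd (xs : List String) : ∀ i : Nat,
    (findTitleA xs i).2 = 0 ∨ i < (findTitleA xs i).2 := by
  induction xs with
  | nil => intro i; simp [findTitleA]
  | cons l rest ih =>
    intro i
    by_cases h : PySem.Str.strip l ≠ ""
    · right; simp [findTitleA, h]
    · simp only [findTitleA, h, if_false]
      rcases ih (i + 1) with h0 | hgt
      · exact Or.inl h0
      · exact Or.inr (by omega)

-- A's (title, join of filtered tail) equals the head/tail selection on the filtered list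
lemma findA_main (xs : List String) : ∀ i : Nat,
    ((findTitleA xs i).1,
      PySem.Str.join "\n" ((xs.drop ((findTitleA xs i).2 - i)).filterMap pvFiltLine))
    = (match xs.filterMap pvFiltLine with
       | [] => ("", "")
       | t :: r => (t, PySem.Str.join "\n" r)) := by
  induction xs with
  | nil =>
    intro i
    simp [findTitleA, PySem.Str.join, PySem.Chars.join, String.ofList]
    rfl
  | cons l rest ih =>
    intro i
    by_cases h : PySem.Str.strip l ≠ ""
    · simp [findTitleA, pvFiltLine, h]
    · have hfm : (l :: rest).filterMap pvFiltLine = rest.filterMap pvFiltLine := by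
        simp [pvFiltLine, h]
      have hft : findTitleA (l :: rest) i = findTitleA rest (i + 1) := by
        simp [findTitleA, h]
      rcases findTitleA_snd rest (i + 1) with h0 | hgt
      · rw [hft, hfm, h0]
        have : (0 : Nat) - i = 0 := by omega
        rw [this]
        have := ih (i + 1)
        rw [h0] at this
        simpa [hfm] using this
      · rw [hft, hfm]
        have hd : (l :: rest).drop ((findTitleA rest (i + 1)).2 - i)
            = rest.drop ((findTitleA rest (i + 1)).2 - (i + 1)) := by
          have : (findTitleA rest (i + 1)).2 - i = ((findTitleA rest (i + 1)).2 - (i + 1)) + 1 := by omega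
          rw [this, List.drop_succ_cons]
        rw [hd]
        exact ih (i + 1)

-- ===== VERDICT (by name: the statement is the Claim_ definition above) =====
theorem extract_title_and_content_py_spec : Claim_equal_extract_title_and_content_py := by
  intro t _
  unfold Spec_extract_title_and_content_py extract_title_and_content_py extract_title_and_content_py_alt
  set lines := (PySem.Chars.splitOn (PySem.Str.strip t).toList ['\n']).map String.ofList with hlines
  have hne : lines ≠ [] := by
    rw [hlines]
    simp [splitOn_ne_nil]
  rw [if_neg hne]
  have hslice : PySem.List.slice lines (some (((findTitleA lines 0).2 : Nat) : Int)) none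
      = lines.drop (findTitleA lines 0).2 := PySem.List.slice_from_natCast _ _
  simp only [hslice]
  have hA := findA_main lines 0
  have hB := altB_char lines
  simp only [Nat.sub_zero] at hA
  rw [hA, hB]
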